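-- pv_equiv track=rewrite | github.com/syngenta/acai-python | acai/apigateway/resolver/modes/mapping.py | __match_mapping
-- ===== SOURCE A (Python) =====
-- def __match_mapping(route, path_list):
--     matching = []
--     if len(route) == len(path_list):
--         for index, _ in enumerate(path_list):
--             if path_list[index] == route[index] or route[index].startswith('{') and route[index].endswith('}'):
--                 matching.append(route[index])
--             else:
--                 matching = []
--     return matching
-- ===== SOURCE B (Python) =====
-- def __match_mapping(route, path_list):
--     if len(route) != len(path_list):
--         return []
--     for r, p in zip(route, path_list):
--         if p != r and not (r.startswith('{') and r.endswith('}')):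
--             return []
--     return list(route)
-- ===== Notes on version B (the rewrite author's own statement) =====
-- stated objective: simpler
-- what changed: B is a plain all-segments-match check (early return [] on the first mismatch, full route copy on success) instead of A's append-to-and-reset accumulator loop.
-- intended difference: On routes of the right length where some segment mismatches but the last segment matches, A returns the accidental nonempty suffix of the route after the last mismatch (its accumulator is reset and then refilled), while B returns [], the intended 'no match' answer for a route containing a mismatched segment. — e.g. on __match_mapping(["a", "{id}"], ["x", "5"]): A returns ["{id}"], B returns []
import Mathlib
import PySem

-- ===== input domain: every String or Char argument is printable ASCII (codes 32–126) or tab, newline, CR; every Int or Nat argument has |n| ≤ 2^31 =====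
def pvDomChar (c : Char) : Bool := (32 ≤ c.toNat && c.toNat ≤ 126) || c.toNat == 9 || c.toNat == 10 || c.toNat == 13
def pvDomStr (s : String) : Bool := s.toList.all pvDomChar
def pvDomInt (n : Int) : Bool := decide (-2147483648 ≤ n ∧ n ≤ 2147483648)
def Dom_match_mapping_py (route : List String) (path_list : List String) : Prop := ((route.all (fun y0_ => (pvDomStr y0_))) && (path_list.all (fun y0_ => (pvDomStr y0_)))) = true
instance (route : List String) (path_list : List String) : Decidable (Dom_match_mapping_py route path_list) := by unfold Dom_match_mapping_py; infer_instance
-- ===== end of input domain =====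

-- B is the plain all-segments-match check (return the route copy or []), replacing A's
-- append-and-reset accumulator; A's nonempty suffix after a reset is declared in D_ below.

-- ===== PORT A =====
-- the segment test: path_list[i] == route[i] or route[i].startswith('{') and route[i].endswith('}')
-- (indices are always in range when used, so getD with a default is exact)
def pvCond (route : List String) (path_list : List String) (index : Nat) : Bool :=
  (path_list.getD index "" == route.getD index "") ||
  (PySem.Str.startswith (route.getD index "") "{" && PySem.Str.endswith (route.getD index "") "}")

def match_mapping_py (route : List String) (path_list : List String) : List String :=
  if route.length = path_list.length then
    (List.range path_list.length).foldl
      (fun matching index =>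
        if pvCond route path_list index then matching ++ [route.getD index ""] else [])
      []
  else []

-- ===== PORT B =====
def pvAllMatch : List (String × String) → Bool
  | [] => true
  | (r, p) :: rest =>
    if p != r && !(PySem.Str.startswith r "{" && PySem.Str.endswith r "}") then false
    else pvAllMatch rest

def match_mapping_py_alt (route : List String) (path_list : List String) : List String :=
  if route.length ≠ path_list.length then []
  else if pvAllMatch (route.zip path_list) then route else []

-- ===== PRECONDITION & SPEC =====
-- On equal-length inputs where some segment mismatches but the LAST segment matches, A returns
-- the accidental nonempty suffix of the route after the last mismatch (its accumulator is reset
-- and then refilled), while B returns [], the intended answer for a route with a mismatch.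
def D_match_mapping_py (route : List String) (path_list : List String) : Prop :=
  route.length = path_list.length ∧ path_list ≠ [] ∧
  (∃ i < path_list.length, pvCond route path_list i = false) ∧
  pvCond route path_list (path_list.length - 1) = true
instance (route : List String) (path_list : List String) : Decidable (D_match_mapping_py route path_list) := by unfold D_match_mapping_py; infer_instance

def Spec_match_mapping_py (route : List String) (path_list : List String) (out : List String) : Prop := ¬ D_match_mapping_py route path_list → out = match_mapping_py_alt route path_list
instance (route : List String) (path_list : List String) (out : List String) : Decidable (Spec_match_mapping_py route path_list out) := by unfold Spec_match_mapping_py; infer_instance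

def pvDiffWitness_match_mapping_py : List String × List String := (["a", "{id}"], ["x", "5"])
def pvDiffWitnessOut_match_mapping_py : (List String) × (List String) := (["{id}"], [])

-- ===== CLAIM (what is proved, stated in full; the proofs are below) =====
def Claim_unchanged_match_mapping_py : Prop := ∀ (route : List String) (path_list : List String), Dom_match_mapping_py route path_list → Spec_match_mapping_py route path_list (match_mapping_py route path_list)
def Claim_changed_match_mapping_py : Prop := Dom_match_mapping_py (pvDiffWitness_match_mapping_py.1) (pvDiffWitness_match_mapping_py.2) ∧ D_match_mapping_py (pvDiffWitness_match_mapping_py.1) (pvDiffWitness_match_mapping_py.2) ∧ match_mapping_py (pvDiffWitness_match_mapping_py.1) (pvDiffWitness_match_mapping_py.2) = pvDiffWitnessOut_match_mapping_py.1 ∧ match_mapping_py_alt (pvDiffWitness_match_mapping_py.1) (pvDiffWitness_match_mapping_py.2) = pvDiffWitnessOut_match_mapping_py.2 ∧ pvDiffWitnessOut_match_mapping_py.1 ≠ pvDiffWitnessOut_match_mapping_py.2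
def Claim_exact_match_mapping_py : Prop := ∀ (route : List String) (path_list : List String), Dom_match_mapping_py route path_list → D_match_mapping_py route path_list → match_mapping_py route path_list ≠ match_mapping_py_alt route path_list

-- ===== LEMMAS AND PROOFS =====

-- A's loop body, and an Int-valued shadow fold tracking the index of the last mismatch
def pvStepA (route : List String) (path_list : List String) (matching : List String) (index : Nat) : List String :=
  if pvCond route path_list index then matching ++ [route.getD index ""] else []

def pvStepB (route : List String) (path_list : List String) (last_fail : Int) (i : Nat) : Int :=
  if !(pvCond route path_list i) then (i : Int) else last_fail

-- invariant: after k steps A's accumulator is the slice of route.take k after the last mismatch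
lemma pv_invariant (route path_list : List String) (k : Nat) (hk : k ≤ route.length) :
    -1 ≤ (List.range k).foldl (pvStepB route path_list) (-1) ∧
    (List.range k).foldl (pvStepB route path_list) (-1) < (k : Int) ∧
    (List.range k).foldl (pvStepA route path_list) [] =
      (route.take k).drop ((List.range k).foldl (pvStepB route path_list) (-1) + 1).toNat := by
  induction k with
  | zero => simp
  | succ k ih =>
    obtain ⟨h1, h2, h3⟩ := ih (Nat.le_of_succ_le hk)
    rw [List.range_succ, List.foldl_append, List.foldl_append, List.foldl_cons, List.foldl_nil,
        List.foldl_cons, List.foldl_nil]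
    have hklt : k < route.length := hk
    by_cases hc : pvCond route path_list k = true
    · have hB : pvStepB route path_list ((List.range k).foldl (pvStepB route path_list) (-1)) k
          = (List.range k).foldl (pvStepB route path_list) (-1) := by
        simp [pvStepB, hc]
      refine ⟨by omega, by rw [hB]; push_cast; omega, ?_⟩
      rw [hB, h3]
      have htake : route.take (k + 1) = route.take k ++ [route.getD k ""] := by
        rw [List.take_succ]
        congr 1
        rw [List.getElem?_eq_getElem hklt]
        simp [List.getD, List.getElem?_eq_getElem hklt]
      have hlen : ((List.range k).foldl (pvStepB route path_list) (-1) + 1).toNat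
          ≤ (route.take k).length := by
        rw [List.length_take]
        omega
      rw [htake, pvStepA, if_pos hc, List.drop_append_of_le_length hlen]
    · have hB : pvStepB route path_list ((List.range k).foldl (pvStepB route path_list) (-1)) k
          = (k : Int) := by
        simp [pvStepB, hc]
      refine ⟨by rw [hB]; omega, by rw [hB]; push_cast; omega, ?_⟩
      rw [hB, pvStepA, if_neg hc]
      have : ((k : Int) + 1).toNat = k + 1 := by omega
      rw [this]
      symm
      apply List.drop_eq_nil_of_le
      simp

-- B's all-match check holds iff every index passes the segment test
lemma pv_allMatch_iff (route path_list : List String) (h : route.length = path_list.length) :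
    pvAllMatch (route.zip path_list) = true ↔
      ∀ i < path_list.length, pvCond route path_list i = true := by
  induction route generalizing path_list with
  | nil =>
    cases path_list with
    | nil => simp [pvAllMatch]
    | cons p pt => simp at h
  | cons r rt ih =>
    cases path_list with
    | nil => simp at h
    | cons p pt =>
      simp only [List.length_cons, Nat.succ_inj] at h
      have hcond0 : pvCond (r :: rt) (p :: pt) 0 =
          (p == r || (PySem.Str.startswith r "{" && PySem.Str.endswith r "}")) := by
        simp [pvCond, List.getD]
      have hcondS : ∀ i, pvCond (r :: rt) (p :: pt) (i + 1) = pvCond rt pt i := by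
        intro i; simp [pvCond, List.getD]
      constructor
      · intro hall i hi
        simp only [pvAllMatch, List.zip_cons_cons] at hall
        cases hc : (p != r && !(PySem.Str.startswith r "{" && PySem.Str.endswith r "}")) with
        | true => rw [hc] at hall; simp at hall
        | false =>
          rw [hc] at hall
          simp only [Bool.false_eq_true, if_false] at hall
          cases i with
          | zero =>
            rw [hcond0]
            cases hpr : (p == r) with
            | true => simp
            | false =>
              simp only [bne, hpr, Bool.not_false, Bool.true_and, Bool.not_eq_false'] at hc
              rw [hc, Bool.or_true]
          | succ j =>
            rw [hcondS]
            simp only [List.length_cons] at hi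
            exact (ih pt h).mp hall j (by omega)
      · intro hall
        simp only [pvAllMatch, List.zip_cons_cons]
        have h0 := hall 0 (Nat.succ_pos _)
        rw [hcond0] at h0
        have hc : (p != r && !(PySem.Str.startswith r "{" && PySem.Str.endswith r "}")) = false := by
          cases hpr : (p == r) with
          | true => simp [bne, hpr]
          | false => simp [bne, hpr]; simpa [hpr] using h0
        rw [hc]
        simp only [Bool.false_eq_true, if_false]
        exact (ih pt h).mpr (fun j hj => by rw [← hcondS]; exact hall (j+1) (by simp only [List.length_cons]; omega))

-- all segments pass ⇒ the shadow fold stays at -1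
lemma pv_lf_all (route path_list : List String) (k : Nat)
    (hall : ∀ i < k, pvCond route path_list i = true) :
    (List.range k).foldl (pvStepB route path_list) (-1) = -1 := by
  induction k with
  | zero => simp
  | succ k ih =>
    rw [List.range_succ, List.foldl_append, List.foldl_cons, List.foldl_nil,
        ih (fun i hi => hall i (by omega)), pvStepB, hall k (by omega)]
    simp

-- some segment fails ⇒ the shadow fold is ≥ 0
lemma pv_lf_fail (route path_list : List String) (k : Nat)
    (hfail : ∃ i < k, pvCond route path_list i = false) :
    0 ≤ (List.range k).foldl (pvStepB route path_list) (-1) := by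
  induction k with
  | zero => obtain ⟨i, hi, _⟩ := hfail; omega
  | succ k ih =>
    rw [List.range_succ, List.foldl_append, List.foldl_cons, List.foldl_nil, pvStepB]
    obtain ⟨i, hi, hci⟩ := hfail
    by_cases hck : pvCond route path_list k = true
    · rw [hck]
      simp only [Bool.not_true, Bool.false_eq_true, if_false]
      have hik : i ≠ k := by intro he; rw [he, hck] at hci; simp at hci
      exact ih ⟨i, by omega, hci⟩
    · simp only [Bool.not_eq_true] at hck
      rw [hck]; simp

-- last segment fails ⇒ the shadow fold ends at k
lemma pv_lf_last (route path_list : List String) (k : Nat)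
    (hlast : pvCond route path_list k = false) :
    (List.range (k + 1)).foldl (pvStepB route path_list) (-1) = (k : Int) := by
  rw [List.range_succ, List.foldl_append, List.foldl_cons, List.foldl_nil, pvStepB, hlast]
  simp

-- last segment passes ⇒ the last step preserves the shadow fold
lemma pv_lf_keep (route path_list : List String) (k : Nat)
    (hlast : pvCond route path_list k = true) :
    (List.range (k + 1)).foldl (pvStepB route path_list) (-1) =
      (List.range k).foldl (pvStepB route path_list) (-1) := by
  rw [List.range_succ, List.foldl_append, List.foldl_cons, List.foldl_nil, pvStepB, hlast]
  simp

-- ===== VERDICT (by name: the statements are the Claim_ definitions above) =====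
theorem match_mapping_py_spec : Claim_unchanged_match_mapping_py := by
  intro route path_list _
  intro hnd
  unfold match_mapping_py match_mapping_py_alt
  by_cases h : route.length = path_list.length
  · rw [if_pos h, if_neg (by omega)]
    by_cases hall : ∀ i < path_list.length, pvCond route path_list i = true
    · rw [if_pos ((pv_allMatch_iff route path_list h).mpr hall)]
      obtain ⟨_, _, h3⟩ := pv_invariant route path_list path_list.length (by omega)
      show (List.range path_list.length).foldl (pvStepA route path_list) [] = route
      rw [h3, pv_lf_all route path_list path_list.length hall]
      simp [← h]
    · rw [if_neg (by rw [pv_allMatch_iff route path_list h]; exact hall)]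
      push_neg at hall
      obtain ⟨i, hi, hci⟩ := hall
      simp only [Bool.not_eq_true] at hci
      have hne : path_list ≠ [] := by
        intro hemp; rw [hemp] at hi; simp at hi
      have hlastfail : pvCond route path_list (path_list.length - 1) = false := by
        by_contra hct
        simp only [Bool.not_eq_false] at hct
        exact hnd ⟨h, hne, ⟨i, hi, hci⟩, hct⟩
      have hn : path_list.length = (path_list.length - 1) + 1 := by
        have : 0 < path_list.length := List.length_pos_of_ne_nil hne
        omega
      obtain ⟨_, _, h3⟩ := pv_invariant route path_list path_list.length (by omega)
      show (List.range path_list.length).foldl (pvStepA route path_list) [] = []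
      rw [h3, hn, pv_lf_last route path_list _ hlastfail]
      apply List.drop_eq_nil_of_le
      rw [List.length_take]
      omega
  · rw [if_neg h, if_pos (by omega)]

theorem match_mapping_py_changed : Claim_changed_match_mapping_py := by
  unfold Claim_changed_match_mapping_py; decide

theorem match_mapping_py_tight : Claim_exact_match_mapping_py := by
  intro route path_list _ hd
  obtain ⟨h, hne, hfail, hlast⟩ := hd
  have hn : 0 < path_list.length := List.length_pos_of_ne_nil hne
  unfold match_mapping_py match_mapping_py_alt
  rw [if_pos h, if_neg (by omega)]
  have hBfalse : pvAllMatch (route.zip path_list) = false := by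
    rw [Bool.eq_false_iff]
    intro ht
    obtain ⟨i, hi, hci⟩ := hfail
    have := (pv_allMatch_iff route path_list h).mp ht i hi
    simp [this] at hci
  rw [hBfalse]
  simp only [Bool.false_eq_true, if_false]
  -- A's result is a nonempty suffix of route
  have hn1 : path_list.length = (path_list.length - 1) + 1 := by omega
  have hifail : ∃ i < path_list.length - 1, pvCond route path_list i = false := by
    obtain ⟨i, hi, hci⟩ := hfail
    refine ⟨i, ?_, hci⟩
    rcases Nat.lt_or_ge i (path_list.length - 1) with h' | h'
    · exact h'
    · exfalso
      have : i = path_list.length - 1 := by omega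
      rw [this, hlast] at hci
      simp at hci
  obtain ⟨_, h2', _⟩ := pv_invariant route path_list (path_list.length - 1) (by omega)
  have hge := pv_lf_fail route path_list (path_list.length - 1) hifail
  obtain ⟨_, _, h3⟩ := pv_invariant route path_list path_list.length (by omega)
  show (List.range path_list.length).foldl (pvStepA route path_list) [] ≠ []
  rw [h3, hn1, pv_lf_keep route path_list _ hlast]
  intro hnil
  have hlen := congrArg List.length hnil
  rw [List.length_drop, List.length_take, List.length_nil] at hlen
  omega
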